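-- pv_equiv track=rewrite | github.com/Dreaming-future/LanQiao-python | 第十二届蓝桥杯 国赛/异或三角.py | solve
-- ===== SOURCE A (Python) =====
-- N = 32
--
-- f = [[[[[[[-1]*2 for _ in range(2)] for _ in range(2)] for _ in range(2)]for _ in range(2)] for _ in range(2)] for _ in range(N)]
--
-- a = [0]*N
--
-- def dfs(pos, op1, op2, op3, c1, c2, big):
--     if not pos: return big and c1 and c2
--     # 如果不是-1的话，也就是计算过，记忆化搜索
--     if ~f[pos][op1][op2][op3][c1][c2][big]:
--         return f[pos][op1][op2][op3][c1][c2][big]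
--
--     up1 = a[pos] if op1 else 1
--     up2 = a[pos] if op2 else 1
--     up3 = a[pos] if op3 else 1
--     res = 0
--     res += dfs(pos-1,op1 and (not up1),op2 and (not up2),op3 and (not up3),c1,c2,big)
--     if up1 and up3:
--         res+=dfs(pos-1,op1,op2 and (up2==0),op3,c1,1,big);
--     if up2 and up3:
--         res+=dfs(pos-1,op1 and (up1==0),op2,op3,1,c2,big);
--     if c1 and c2:
--         res+=dfs(pos-1,op1,op2,op3 and (not up3),1,1,1)
--     f[pos][op1][op2][op3][c1][c2][big] = res
--     return f[pos][op1][op2][op3][c1][c2][big]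
--
-- def solve(x):
--     pos = 0
--     # 把数拆分至a数组中
--     for i in range(N):
--         for j in range(2):
--             for k in range(2):
--                 for b in range(2):
--                     for c in range(2):
--                         for d in range(2):
--                             for e in range(2):
--                                 f[i][j][k][b][c][d][e] = -1
--
--     while x:
--         pos += 1
--         a[pos] = x%2 # x % 进制
--         x = x//2 # x / 进制
--     # 从最高位开始枚举，刚开始默认为有限制
--     return dfs(pos,1,1,1,0,0,0)
-- ===== SOURCE B (Python) =====
-- def solve(x):
--     # bottom-up digit DP: bit list (LSB first), then one 64-entry table per bit layer
--     bits = []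
--     while x:
--         bits.append(x % 2)
--         x //= 2
--
--     def enc(o1, o2, o3, c1, c2, bg):
--         return (32 if o1 else 0) + (16 if o2 else 0) + (8 if o3 else 0) \
--              + (4 if c1 else 0) + (2 if c2 else 0) + (1 if bg else 0)
--
--     dp = [1 if (s % 2 and s // 4 % 2 and s // 2 % 2) else 0 for s in range(64)]
--     for b in bits:
--         ndp = []
--         for s in range(64):
--             o1, o2, o3 = s // 32 % 2, s // 16 % 2, s // 8 % 2
--             c1, c2, bg = s // 4 % 2, s // 2 % 2, s % 2
--             u1 = b if o1 else 1
--             u2 = b if o2 else 1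
--             u3 = b if o3 else 1
--             r = dp[enc(o1 and not u1, o2 and not u2, o3 and not u3, c1, c2, bg)]
--             if u1 and u3:
--                 r += dp[enc(o1, o2 and u2 == 0, o3, c1, 1, bg)]
--             if u2 and u3:
--                 r += dp[enc(o1 and u1 == 0, o2, o3, 1, c2, bg)]
--             if c1 and c2:
--                 r += dp[enc(o1, o2, o3 and not u3, 1, 1, 1)]
--             ndp.append(r)
--         dp = ndp
--     return dp[enc(1, 1, 1, 0, 0, 0)]
-- ===== Notes on version B (the rewrite author's own statement) =====
-- stated objective: alternative
-- what changed: Replaces the memoized top-down dfs over a global 7-dimensional table with an explicit bottom-up DP that keeps one 64-entry layer per bit and folds the bit list over it.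
import Mathlib
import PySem

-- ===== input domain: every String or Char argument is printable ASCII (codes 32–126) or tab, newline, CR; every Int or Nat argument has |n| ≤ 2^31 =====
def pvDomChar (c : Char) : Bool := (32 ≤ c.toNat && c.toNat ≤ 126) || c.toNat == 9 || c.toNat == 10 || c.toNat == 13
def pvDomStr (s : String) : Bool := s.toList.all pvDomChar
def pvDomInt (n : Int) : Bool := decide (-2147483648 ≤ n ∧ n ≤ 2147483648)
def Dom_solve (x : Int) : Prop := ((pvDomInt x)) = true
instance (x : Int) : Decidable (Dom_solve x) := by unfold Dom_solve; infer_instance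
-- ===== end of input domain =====

-- B replaces A's memoized top-down recursion (dfs + 7-dimensional memo table) by an explicit
-- bottom-up DP: one 64-entry layer per bit, filled from the base layer upward (objective: alternative).

-- ===== PORT A =====
-- memo table f: a function Nat×Bool⁶ → Int, -1 = "not computed" exactly as in the Python
def pvMemo : Type := Nat → Bool → Bool → Bool → Bool → Bool → Bool → Int

def pvMset (f : pvMemo) (p : Nat) (o1 o2 o3 c1 c2 bg : Bool) (v : Int) : pvMemo :=
  fun p' a' b' c' d' e' g' =>
    if p' = p ∧ a' = o1 ∧ b' = o2 ∧ c' = o3 ∧ d' = c1 ∧ e' = c2 ∧ g' = bg then v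
    else f p' a' b' c' d' e' g'

-- 'if cond: res += dfs(...)' — one guarded accumulation step threading the memo
def pvDStep (r : Int × pvMemo) (c : Prop) [Decidable c] (k : pvMemo → Int × pvMemo) : Int × pvMemo :=
  if c then (r.1 + (k r.2).1, (k r.2).2) else r

-- literal port of dfs; the Python op/c/big values are always 0/1-truthy, carried here as Bool
def pvDfs (a : Nat → Int) : Nat → Bool → Bool → Bool → Bool → Bool → Bool → pvMemo → Int × pvMemo
  | 0, _, _, _, c1, c2, bg, f => (((bg && c1 && c2).toNat : Int), f)
  | p+1, o1, o2, o3, c1, c2, bg, f =>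
    if f (p+1) o1 o2 o3 c1 c2 bg ≠ -1 then (f (p+1) o1 o2 o3 c1 c2 bg, f)
    else
      let up1 : Int := if o1 then a (p+1) else 1
      let up2 : Int := if o2 then a (p+1) else 1
      let up3 : Int := if o3 then a (p+1) else 1
      let t0 := pvDfs a p (o1 && decide (up1 = 0)) (o2 && decide (up2 = 0)) (o3 && decide (up3 = 0)) c1 c2 bg f
      let t1 := pvDStep t0 (up1 ≠ 0 ∧ up3 ≠ 0) (pvDfs a p o1 (o2 && decide (up2 = 0)) o3 c1 true bg)
      let t2 := pvDStep t1 (up2 ≠ 0 ∧ up3 ≠ 0) (pvDfs a p (o1 && decide (up1 = 0)) o2 o3 true c2 bg)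
      let t3 := pvDStep t2 ((c1 && c2) = true) (pvDfs a p o1 o2 (o3 && decide (up3 = 0)) true true true)
      (t3.1, pvMset t3.2 (p+1) o1 o2 o3 c1 c2 bg t3.1)

-- the 'while x:' bit-splitting loop; fuel 33 only totalizes it (under Pre_ at most 32 iterations run)
def pvSplitA : Nat → Int → Nat → (Nat → Int) → Nat × (Nat → Int)
  | 0, _, pos, a => (pos, a)
  | fuel+1, x, pos, a =>
    if x ≠ 0 then
      pvSplitA fuel (PySem.Int.floordiv x 2) (pos+1)
        (fun i => if i = pos+1 then PySem.Int.mod x 2 else a i)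
    else (pos, a)

def solve (x : Int) : Int :=
  let s := pvSplitA 33 x 0 (fun _ => 0)
  (pvDfs s.2 s.1 true true true false false false (fun _ _ _ _ _ _ _ => -1)).1

-- ===== PORT B =====
def pvEnc (o1 o2 o3 c1 c2 bg : Bool) : Int :=
  (if o1 then 32 else 0) + (if o2 then 16 else 0) + (if o3 then 8 else 0)
  + (if c1 then 4 else 0) + (if c2 then 2 else 0) + (if bg then 1 else 0)

-- dp[i]: every index used is pvEnc of a state, hence in [0,64)
def pvLk (dp : List Int) (i : Int) : Int := PySem.List.pyGetD dp i 0

def pvBitsB : Nat → Int → List Int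
  | 0, _ => []
  | fuel+1, x => if x ≠ 0 then PySem.Int.mod x 2 :: pvBitsB fuel (PySem.Int.floordiv x 2) else []

def pvBase : List Int :=
  (PySem.List.pyRange 0 64 1).map (fun s =>
    if PySem.Int.mod s 2 ≠ 0 ∧ PySem.Int.mod (PySem.Int.floordiv s 4) 2 ≠ 0
        ∧ PySem.Int.mod (PySem.Int.floordiv s 2) 2 ≠ 0 then 1 else 0)

def pvCell (b : Int) (dp : List Int) (s : Int) : Int :=
  let o1 : Bool := decide (PySem.Int.mod (PySem.Int.floordiv s 32) 2 ≠ 0)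
  let o2 : Bool := decide (PySem.Int.mod (PySem.Int.floordiv s 16) 2 ≠ 0)
  let o3 : Bool := decide (PySem.Int.mod (PySem.Int.floordiv s 8) 2 ≠ 0)
  let c1 : Bool := decide (PySem.Int.mod (PySem.Int.floordiv s 4) 2 ≠ 0)
  let c2 : Bool := decide (PySem.Int.mod (PySem.Int.floordiv s 2) 2 ≠ 0)
  let bg : Bool := decide (PySem.Int.mod s 2 ≠ 0)
  let u1 : Int := if o1 then b else 1
  let u2 : Int := if o2 then b else 1
  let u3 : Int := if o3 then b else 1
  let r := pvLk dp (pvEnc (o1 && decide (u1 = 0)) (o2 && decide (u2 = 0)) (o3 && decide (u3 = 0)) c1 c2 bg)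
  let r := if u1 ≠ 0 ∧ u3 ≠ 0 then r + pvLk dp (pvEnc o1 (o2 && decide (u2 = 0)) o3 c1 true bg) else r
  let r := if u2 ≠ 0 ∧ u3 ≠ 0 then r + pvLk dp (pvEnc (o1 && decide (u1 = 0)) o2 o3 true c2 bg) else r
  let r := if c1 && c2 then r + pvLk dp (pvEnc o1 o2 (o3 && decide (u3 = 0)) true true true) else r
  r

def pvLayer (b : Int) (dp : List Int) : List Int :=
  (PySem.List.pyRange 0 64 1).map (pvCell b dp)

def solve_alt (x : Int) : Int :=
  let bits := pvBitsB 33 x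
  pvLk (bits.foldl (fun dp b => pvLayer b dp) pvBase) (pvEnc true true true false false false)

-- ===== PRECONDITION & SPEC =====
-- Pre_ excludes exactly the inputs where the Python A raises: negative x (the while-loop never
-- terminates and a[pos] overruns, IndexError) and x = 2^31 (33rd bit, a[32] IndexError).
def Pre_solve (x : Int) : Prop := 0 ≤ x ∧ x < 2147483648
instance (x : Int) : Decidable (Pre_solve x) := by unfold Pre_solve; infer_instance

def pvWitness_solve : Int := (7)

def Spec_solve (x : Int) (out : Int) : Prop := out = solve_alt x
instance (x : Int) (out : Int) : Decidable (Spec_solve x out) := by unfold Spec_solve; infer_instance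

-- ===== CLAIM (what is proved, stated in full; the proofs are below) =====
def Claim_equal_solve : Prop := ∀ (x : Int), Dom_solve x → Pre_solve x → Spec_solve x (solve x)

-- ===== LEMMAS AND PROOFS =====

-- the common mathematical recursion: result of the digit DP on the remaining (MSB-first) bit list
def pvG : List Int → Bool → Bool → Bool → Bool → Bool → Bool → Int
  | [], _, _, _, c1, c2, bg => ((bg && c1 && c2).toNat : Int)
  | b :: bs, o1, o2, o3, c1, c2, bg =>
    let u1 : Int := if o1 then b else 1
    let u2 : Int := if o2 then b else 1
    let u3 : Int := if o3 then b else 1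
    pvG bs (o1 && decide (u1 = 0)) (o2 && decide (u2 = 0)) (o3 && decide (u3 = 0)) c1 c2 bg
    + (if u1 ≠ 0 ∧ u3 ≠ 0 then pvG bs o1 (o2 && decide (u2 = 0)) o3 c1 true bg else 0)
    + (if u2 ≠ 0 ∧ u3 ≠ 0 then pvG bs (o1 && decide (u1 = 0)) o2 o3 true c2 bg else 0)
    + (if (c1 && c2) = true then pvG bs o1 o2 (o3 && decide (u3 = 0)) true true true else 0)

-- [a p, a (p-1), …, a 1]
def pvRev (a : Nat → Int) : Nat → List Int
  | 0 => []
  | p+1 => a (p+1) :: pvRev a p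

def pvInv (a : Nat → Int) (f : pvMemo) : Prop :=
  ∀ p o1 o2 o3 c1 c2 bg, f p o1 o2 o3 c1 c2 bg ≠ -1 →
    f p o1 o2 o3 c1 c2 bg = pvG (pvRev a p) o1 o2 o3 c1 c2 bg

lemma pvInv_empty (a : Nat → Int) : pvInv a (fun _ _ _ _ _ _ _ => -1) := by
  intro p o1 o2 o3 c1 c2 bg h; simp at h

lemma pvInv_mset (a : Nat → Int) (f : pvMemo) (p : Nat) (o1 o2 o3 c1 c2 bg : Bool) (v : Int)
    (hf : pvInv a f) (hv : v = pvG (pvRev a p) o1 o2 o3 c1 c2 bg) :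
    pvInv a (pvMset f p o1 o2 o3 c1 c2 bg v) := by
  intro p' a' b' c' d' e' g' h
  unfold pvMset at h ⊢
  by_cases hc : p' = p ∧ a' = o1 ∧ b' = o2 ∧ c' = o3 ∧ d' = c1 ∧ e' = c2 ∧ g' = bg
  · obtain ⟨h1, h2, h3, h4, h5, h6, h7⟩ := hc
    subst h1; subst h2; subst h3; subst h4; subst h5; subst h6; subst h7
    simp [hv]
  · rw [if_neg hc] at h ⊢; exact hf _ _ _ _ _ _ _ h

lemma pvDStep_ok (a : Nat → Int) (r : Int × pvMemo) (c : Prop) [Decidable c]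
    (k : pvMemo → Int × pvMemo) (v w : Int)
    (hr : r.1 = v) (hri : pvInv a r.2)
    (hk : ∀ f, pvInv a f → (k f).1 = w ∧ pvInv a (k f).2) :
    (pvDStep r c k).1 = v + (if c then w else 0) ∧ pvInv a (pvDStep r c k).2 := by
  unfold pvDStep
  split_ifs with h
  · exact ⟨by rw [hr, (hk r.2 hri).1], (hk r.2 hri).2⟩
  · exact ⟨by simp [hr], hri⟩

lemma pvDfs_ok (a : Nat → Int) :
    ∀ (p : Nat) (o1 o2 o3 c1 c2 bg : Bool) (f : pvMemo), pvInv a f →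
      (pvDfs a p o1 o2 o3 c1 c2 bg f).1 = pvG (pvRev a p) o1 o2 o3 c1 c2 bg ∧
      pvInv a (pvDfs a p o1 o2 o3 c1 c2 bg f).2 := by
  intro p
  induction p with
  | zero => intro o1 o2 o3 c1 c2 bg f hf; exact ⟨rfl, hf⟩
  | succ p ih =>
    intro o1 o2 o3 c1 c2 bg f hf
    rw [pvDfs]
    by_cases hit : f (p+1) o1 o2 o3 c1 c2 bg ≠ -1
    · rw [if_pos hit]
      exact ⟨hf _ _ _ _ _ _ _ hit, hf⟩
    · rw [if_neg hit]
      simp only []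
      set up1 : Int := if o1 then a (p+1) else 1 with hup1
      set up2 : Int := if o2 then a (p+1) else 1 with hup2
      set up3 : Int := if o3 then a (p+1) else 1 with hup3
      obtain ⟨h0v, h0i⟩ := ih (o1 && decide (up1 = 0)) (o2 && decide (up2 = 0)) (o3 && decide (up3 = 0)) c1 c2 bg f hf
      obtain ⟨h1v, h1i⟩ := pvDStep_ok a _ (up1 ≠ 0 ∧ up3 ≠ 0) _ _
        (pvG (pvRev a p) o1 (o2 && decide (up2 = 0)) o3 c1 true bg) h0v h0i
        (fun f' hf' => ih o1 (o2 && decide (up2 = 0)) o3 c1 true bg f' hf')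
      obtain ⟨h2v, h2i⟩ := pvDStep_ok a _ (up2 ≠ 0 ∧ up3 ≠ 0) _ _
        (pvG (pvRev a p) (o1 && decide (up1 = 0)) o2 o3 true c2 bg) h1v h1i
        (fun f' hf' => ih (o1 && decide (up1 = 0)) o2 o3 true c2 bg f' hf')
      obtain ⟨h3v, h3i⟩ := pvDStep_ok a _ ((c1 && c2) = true) _ _
        (pvG (pvRev a p) o1 o2 (o3 && decide (up3 = 0)) true true true) h2v h2i
        (fun f' hf' => ih o1 o2 (o3 && decide (up3 = 0)) true true true f' hf')
      constructor
      · rw [h3v]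
        conv_rhs => rw [pvRev, pvG]

      · exact pvInv_mset a _ _ _ _ _ _ _ _ _ h3i h3v
  
-- the two bit-splitting loops run in lock-step
lemma pvSplit_agree :
    ∀ (fuel : Nat) (x : Int) (pos : Nat) (a : Nat → Int),
      (pvSplitA fuel x pos a).1 = pos + (pvBitsB fuel x).length ∧
      pvRev (pvSplitA fuel x pos a).2 (pvSplitA fuel x pos a).1 =
        (pvBitsB fuel x).reverse ++ pvRev a pos := by
  intro fuel
  induction fuel with
  | zero => intro x pos a; simp [pvSplitA, pvBitsB]
  | succ fuel ih =>
    intro x pos a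
    rw [pvSplitA, pvBitsB]
    by_cases hx : x ≠ 0
    · rw [if_pos hx, if_pos hx]
      set a' : Nat → Int := fun i => if i = pos+1 then PySem.Int.mod x 2 else a i with ha'
      obtain ⟨hlen, hrev⟩ := ih (PySem.Int.floordiv x 2) (pos+1) a'
      refine ⟨by rw [hlen]; simp [List.length_cons]; omega, ?_⟩
      rw [hrev]
      have hrev' : pvRev a' (pos+1) = PySem.Int.mod x 2 :: pvRev a pos := by
        rw [pvRev]
        congr 1
        · simp [ha']
        · have : ∀ q, q ≤ pos → pvRev a' q = pvRev a q := by
            intro q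
            induction q with
            | zero => intro _; rfl
            | succ q ihq =>
              intro hq
              rw [pvRev, pvRev, ihq (by omega)]
              congr 1
              simp [ha']; omega
          exact this pos le_rfl
      rw [hrev']
      simp
    · rw [if_neg hx, if_neg hx]; simp
  
-- pvCell at an encoded state, with the six decodes already carried out
def pvCellB (b : Int) (dp : List Int) (o1 o2 o3 c1 c2 bg : Bool) : Int :=
  let u1 : Int := if o1 then b else 1
  let u2 : Int := if o2 then b else 1
  let u3 : Int := if o3 then b else 1
  let r := pvLk dp (pvEnc (o1 && decide (u1 = 0)) (o2 && decide (u2 = 0)) (o3 && decide (u3 = 0)) c1 c2 bg)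
  let r := if u1 ≠ 0 ∧ u3 ≠ 0 then r + pvLk dp (pvEnc o1 (o2 && decide (u2 = 0)) o3 c1 true bg) else r
  let r := if u2 ≠ 0 ∧ u3 ≠ 0 then r + pvLk dp (pvEnc (o1 && decide (u1 = 0)) o2 o3 true c2 bg) else r
  let r := if c1 && c2 then r + pvLk dp (pvEnc o1 o2 (o3 && decide (u3 = 0)) true true true) else r
  r

lemma pvCell_enc (b : Int) (dp : List Int) (o1 o2 o3 c1 c2 bg : Bool) :
    pvCell b dp (pvEnc o1 o2 o3 c1 c2 bg) = pvCellB b dp o1 o2 o3 c1 c2 bg := by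
  cases o1 <;> cases o2 <;> cases o3 <;> cases c1 <;> cases c2 <;> cases bg <;> rfl

lemma pvAddIf (p x : Int) (c : Prop) [Decidable c] : (if c then p + x else p) = p + (if c then x else 0) := by
  split_ifs <;> simp

-- B's layer step computes pvG's recursion on the table, state by state
lemma pvLayer_ok (b : Int) (dp : List Int) (l : List Int)
    (h : ∀ o1 o2 o3 c1 c2 bg, pvLk dp (pvEnc o1 o2 o3 c1 c2 bg) = pvG l o1 o2 o3 c1 c2 bg) :
    ∀ o1 o2 o3 c1 c2 bg, pvLk (pvLayer b dp) (pvEnc o1 o2 o3 c1 c2 bg) = pvG (b :: l) o1 o2 o3 c1 c2 bg := by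
  intro o1 o2 o3 c1 c2 bg
  have hlk : pvLk (pvLayer b dp) (pvEnc o1 o2 o3 c1 c2 bg) = pvCell b dp (pvEnc o1 o2 o3 c1 c2 bg) := by
    unfold pvLk pvLayer
    rw [PySem.List.pyGetD_map_pyRange_of_nonneg (pvCell b dp) 64 (pvEnc o1 o2 o3 c1 c2 bg) 0
      (by cases o1 <;> cases o2 <;> cases o3 <;> cases c1 <;> cases c2 <;> cases bg <;> decide)
      (by cases o1 <;> cases o2 <;> cases o3 <;> cases c1 <;> cases c2 <;> cases bg <;> decide)]
  rw [hlk, pvCell_enc, pvG]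
  simp only [pvCellB, pvAddIf, h]

lemma pvBase_ok :
    ∀ o1 o2 o3 c1 c2 bg, pvLk pvBase (pvEnc o1 o2 o3 c1 c2 bg) = pvG [] o1 o2 o3 c1 c2 bg := by
  intro o1 o2 o3 c1 c2 bg
  cases o1 <;> cases o2 <;> cases o3 <;> cases c1 <;> cases c2 <;> cases bg <;> decide

lemma pvFold_ok :
    ∀ (bs : List Int) (dp : List Int) (l : List Int),
      (∀ o1 o2 o3 c1 c2 bg, pvLk dp (pvEnc o1 o2 o3 c1 c2 bg) = pvG l o1 o2 o3 c1 c2 bg) →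
      ∀ o1 o2 o3 c1 c2 bg,
        pvLk (bs.foldl (fun dp b => pvLayer b dp) dp) (pvEnc o1 o2 o3 c1 c2 bg) =
          pvG (bs.reverse ++ l) o1 o2 o3 c1 c2 bg := by
  intro bs
  induction bs with
  | nil => intro dp l h o1 o2 o3 c1 c2 bg; simpa using h o1 o2 o3 c1 c2 bg
  | cons b bs ih =>
    intro dp l h o1 o2 o3 c1 c2 bg
    have := ih (pvLayer b dp) (b :: l) (pvLayer_ok b dp l h) o1 o2 o3 c1 c2 bg
    simpa [List.append_assoc] using this

-- ===== VERDICT (by name: the statement is the Claim_ definition above) =====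
theorem solve_spec : Claim_equal_solve := by
  intro x _ _
  unfold Spec_solve solve solve_alt
  obtain ⟨hlen, hrev⟩ := pvSplit_agree 33 x 0 (fun _ => 0)
  have hA := (pvDfs_ok (pvSplitA 33 x 0 (fun _ => 0)).2 (pvSplitA 33 x 0 (fun _ => 0)).1
    true true true false false false _ (pvInv_empty _)).1
  have hB := pvFold_ok (pvBitsB 33 x) pvBase [] pvBase_ok true true true false false false
  rw [hA, hB, hrev]
  rw [show pvRev (fun _ : Nat => (0:Int)) 0 = [] from rfl, List.append_nil]
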